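-- pv_equiv track=rewrite | github.com/chunghee-hwang/AlgorithmStudy | src/hash/auto_complete.py | solution
-- ===== SOURCE A (Python) =====
-- from collections import defaultdict
--
-- def make_search_list(search_list, search_dict, search):
--     for word in search_list:
--         if word.startswith(search):
--             search_dict[search].append(word)
--
-- def solution(words):
--     answer = 0
--     search_dict = defaultdict(list)
--     search_dict[''] = words
--     for word in words:
--         search = ''
--         prev_search = ''
--         for idx in range(len(word)):
--             search = search+word[idx]
--             if search not in search_dict:
--                 make_search_list(search_dict[prev_search], search_dict, search)
--             answer+=1
--             if len(search_dict[search]) == 1: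
--                 break
--             prev_search = search
--
--     return answer
-- ===== SOURCE B (Python) =====
-- def solution(words):
--     cnt = {}
--     for w in words:
--         p = ''
--         for ch in w:
--             p += ch
--             cnt[p] = cnt.get(p, 0) + 1
--     total = 0
--     for w in words:
--         typed = len(w)
--         p = ''
--         for i, ch in enumerate(w, 1):
--             p += ch
--             if cnt[p] == 1:
--                 typed = i
--                 break
--         total += typed
--     return total
-- ===== Notes on version B (the rewrite author's own statement) =====
-- stated objective: faster
-- what changed: Replaced A's on-demand dictionary of cached filtered word lists (rebuilding candidate lists per new prefix) with a single pass that counts every prefix occurrence once, then walks each word's prefixes until its count is 1.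
import Mathlib
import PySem

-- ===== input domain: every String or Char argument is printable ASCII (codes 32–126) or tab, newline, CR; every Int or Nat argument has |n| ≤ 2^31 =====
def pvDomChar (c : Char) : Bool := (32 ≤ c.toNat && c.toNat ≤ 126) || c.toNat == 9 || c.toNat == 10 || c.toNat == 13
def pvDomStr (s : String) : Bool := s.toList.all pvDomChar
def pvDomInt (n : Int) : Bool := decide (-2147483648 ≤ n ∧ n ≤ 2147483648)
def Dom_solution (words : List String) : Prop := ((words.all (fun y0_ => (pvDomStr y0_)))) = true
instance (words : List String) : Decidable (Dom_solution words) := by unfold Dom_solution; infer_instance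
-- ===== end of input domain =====

-- B replaces A's quadratic cached-filter dictionary by a single prefix-count pass: one counting
-- sweep over all prefixes, then each word walks its prefixes until the count is 1 (asymptotic speed-up).

-- ===== PORT A =====
-- make_search_list(search_list, search_dict, search): append matching words to search_dict[search]
def pvMsl (searchList : List (List Char)) (d : PySem.Dict (List Char) (List (List Char)))
    (search : List Char) : PySem.Dict (List Char) (List (List Char)) :=
  searchList.foldl (fun d word =>
    if PySem.Chars.startswith word search then d.insert search (d.getD search [] ++ [word]) else d) d

-- inner `for idx in range(len(word))` loop of A, with its early break
def pvLoopA (chars : List Char) (search prevSearch : List Char) (answer : Int)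
    (d : PySem.Dict (List Char) (List (List Char))) :
    Int × PySem.Dict (List Char) (List (List Char)) :=
  match chars with
  | [] => (answer, d)
  | c :: rest =>
      let search' := search ++ [c]
      let d' := if d.contains search' then d else pvMsl (d.getD prevSearch []) d search'
      let answer' := answer + 1
      if (d'.getD search' []).length == 1 then (answer', d')
      else pvLoopA rest search' search' answer' d'

def solution (words : List String) : Int :=
  let ws := words.map String.toList
  (ws.foldl (fun (st : Int × PySem.Dict (List Char) (List (List Char))) word =>
      pvLoopA word [] [] st.1 st.2)
    (0, (PySem.Dict.empty).insert [] ws)).1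

-- ===== PORT B =====
-- first pass of B: record every nonempty prefix of every word in a counter
def pvAddPrefixes (d : PySem.Dict (List Char) Int) (w : List Char) : PySem.Dict (List Char) Int :=
  (w.foldl (fun (st : List Char × PySem.Dict (List Char) Int) c =>
      let p := st.1 ++ [c]
      (p, st.2.insert p (st.2.getD p 0 + 1))) ([], d)).2

def pvCnt (ws : List (List Char)) : PySem.Dict (List Char) Int :=
  ws.foldl pvAddPrefixes PySem.Dict.empty

-- second pass of B, per word: keystrokes until the prefix count is 1, else the whole word
def pvTyped (cnt : PySem.Dict (List Char) Int) (chars : List Char) (p : List Char)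
    (i : Int) (typed : Int) : Int :=
  match chars with
  | [] => typed
  | c :: rest =>
      let p' := p ++ [c]
      if cnt.getD p' 0 == 1 then i + 1 else pvTyped cnt rest p' (i + 1) typed

def solution_alt (words : List String) : Int :=
  let ws := words.map String.toList
  let cnt := pvCnt ws
  ws.foldl (fun total w => total + pvTyped cnt w [] 0 (w.length : Int)) 0

-- ===== PRECONDITION & SPEC =====
def Spec_solution (words : List String) (out : Int) : Prop := out = solution_alt words
instance (words : List String) (out : Int) : Decidable (Spec_solution words out) := by unfold Spec_solution; infer_instance

-- ===== CLAIM (what is proved, stated in full; the proofs are below) =====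
def Claim_equal_solution : Prop := ∀ (words : List String), Dom_solution words → Spec_solution words (solution words)

-- ===== LEMMAS AND PROOFS =====

-- number of words having p as a prefix
def pvCntS (ws : List (List Char)) (p : List Char) : Nat :=
  (ws.filter (fun w => PySem.Chars.startswith w p)).length

-- keystrokes consumed from `chars` (prefix so far `p`) until a unique prefix, else all of chars
def pvSteps (ws : List (List Char)) (p : List Char) (chars : List Char) : Nat :=
  match chars with
  | [] => 0
  | c :: rest => if pvCntS ws (p ++ [c]) = 1 then 1 else 1 + pvSteps ws (p ++ [c]) rest


-- B side ---------------------------------------------------------------------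

theorem pvAddAux_getD (chars : List Char) : ∀ (p : List Char)
    (d : PySem.Dict (List Char) Int) (q : List Char),
    ((chars.foldl (fun (st : List Char × PySem.Dict (List Char) Int) c =>
        let p := st.1 ++ [c]
        (p, st.2.insert p (st.2.getD p 0 + 1))) (p, d)).2).getD q 0
      = d.getD q 0 + (if q <+: p ++ chars ∧ p.length < q.length then 1 else 0) := by
  induction chars with
  | nil =>
      intro p d q
      simp only [List.foldl_nil, List.append_nil]
      have : ¬ (q <+: p ∧ p.length < q.length) := by
        rintro ⟨h1, h2⟩
        exact absurd h1.length_le (by omega)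
      simp [this]
  | cons c rest ih =>
      intro p d q
      have heq : p ++ c :: rest = (p ++ [c]) ++ rest := by simp
      rw [heq]
      simp only [List.foldl_cons]
      rw [ih (p ++ [c]) (d.insert (p ++ [c]) (d.getD (p ++ [c]) 0 + 1)) q]
      by_cases hq : q = p ++ [c]
      · subst hq
        rw [PySem.Dict.getD_insert_self]
        have h2 : ¬ ((p ++ [c]).length < (p ++ [c]).length) := by omega
        have h3 : (p ++ [c]) <+: (p ++ [c]) ++ rest := List.prefix_append _ _
        have h4 : p.length < (p ++ [c]).length := by simp
        simp
      · rw [PySem.Dict.getD_eq_get?_getD, PySem.Dict.get?_insert_of_ne _ _ hq,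
            ← PySem.Dict.getD_eq_get?_getD]
        congr 1
        have hiff : (q <+: (p ++ [c]) ++ rest ∧ (p ++ [c]).length < q.length)
            ↔ (q <+: (p ++ [c]) ++ rest ∧ p.length < q.length) := by
          constructor
          · rintro ⟨h1, h2⟩
            exact ⟨h1, by simp at h2; omega⟩
          · rintro ⟨h1, h2⟩
            refine ⟨h1, ?_⟩
            rcases Nat.lt_or_ge (p ++ [c]).length q.length with h | h
            · exact h
            · exfalso
              have hle : q.length ≤ (p ++ [c]).length := by simpa using h
              have hlen : q.length = (p ++ [c]).length := by simp at hle ⊢; omega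
              have : q = List.take q.length ((p ++ [c]) ++ rest) :=
                List.prefix_iff_eq_take.mp h1
              rw [hlen, List.take_left] at this
              exact hq this
        simp only [hiff]
  
theorem pvAddPrefixes_getD (d : PySem.Dict (List Char) Int) (w q : List Char) :
    (pvAddPrefixes d w).getD q 0
      = d.getD q 0 + (if q ≠ [] ∧ q <+: w then 1 else 0) := by
  unfold pvAddPrefixes
  rw [pvAddAux_getD w [] d q]
  congr 1
  have : ((q <+: [] ++ w ∧ ([] : List Char).length < q.length)
        ↔ (q ≠ [] ∧ q <+: w)) := by
    simp only [List.nil_append, List.length_nil]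
    constructor
    · rintro ⟨h1, h2⟩
      exact ⟨by intro h; subst h; simp at h2, h1⟩
    · rintro ⟨h1, h2⟩
      exact ⟨h2, List.length_pos_iff.mpr h1⟩
  simp only [this]

-- number of words with prefix q
theorem pvCnt_getD (ws : List (List Char)) (q : List Char) (hq : q ≠ []) :
    (pvCnt ws).getD q 0 = (pvCntS ws q : Int) := by
  have main : ∀ (l : List (List Char)) (d : PySem.Dict (List Char) Int),
      (l.foldl pvAddPrefixes d).getD q 0 = d.getD q 0 + (pvCntS l q : Int) := by
    intro l
    induction l with
    | nil => intro d; simp [pvCntS]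
    | cons w l ih =>
        intro d
        simp only [List.foldl_cons]
        rw [ih (pvAddPrefixes d w), pvAddPrefixes_getD]
        have : pvCntS (w :: l) q
            = (if PySem.Chars.startswith w q then 1 else 0) + pvCntS l q := by
          simp only [pvCntS, List.filter_cons]
          split <;> simp [Nat.add_comm]
        rw [this]
        by_cases hw : q <+: w
        · have hsw : PySem.Chars.startswith w q = true :=
            (PySem.Chars.startswith_iff w q).mpr hw
          simp [hq, hw, hsw]; omega
        · have hsw : ¬ (PySem.Chars.startswith w q = true) := by
            rw [PySem.Chars.startswith_iff]; exact hw
          simp [hq, hw, hsw]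
  unfold pvCnt
  rw [main ws PySem.Dict.empty, PySem.Dict.getD_of_get?_eq_none _ _ (PySem.Dict.get?_empty q)]
  ring

theorem pvTyped_eq (ws : List (List Char)) (chars : List Char) : ∀ (p : List Char) (i : Int),
    pvTyped (pvCnt ws) chars p i (i + (chars.length : Int)) = i + (pvSteps ws p chars : Int) := by
  induction chars with
  | nil => intro p i; simp [pvTyped, pvSteps]
  | cons c rest ih =>
      intro p i
      have hne : p ++ [c] ≠ [] := by simp
      have hc : (pvCnt ws).getD (p ++ [c]) 0 = (pvCntS ws (p ++ [c]) : Int) :=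
        pvCnt_getD ws (p ++ [c]) hne
      by_cases h : pvCntS ws (p ++ [c]) = 1
      · have : ((pvCnt ws).getD (p ++ [c]) 0 == 1) = true := by
          rw [hc, h]; simp
        simp [pvTyped, pvSteps, this, h]
      · have hb : ((pvCnt ws).getD (p ++ [c]) 0 == 1) = false := by
          rw [hc]
          simp only [beq_eq_false_iff_ne, ne_eq]
          intro hcast
          exact h (by exact_mod_cast hcast)
        have harg : i + ((c :: rest).length : Int) = (i + 1) + (rest.length : Int) := by
          push_cast [List.length_cons]; ring
        simp only [pvTyped, hb, harg]
        rw [ih (p ++ [c]) (i + 1)]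
        simp [pvSteps, h]
        ring

theorem pvFoldl_add_sum {α : Type} (l : List α) (f : α → Int) : ∀ (a : Int),
    l.foldl (fun t w => t + f w) a = a + (l.map f).sum := by
  induction l with
  | nil => intro a; simp
  | cons w l ih => intro a; simp [List.foldl_cons, ih]; ring

-- A side ---------------------------------------------------------------------

-- invariant of A's cache: every present entry is exactly the words with that prefix
def pvInv (ws : List (List Char)) (d : PySem.Dict (List Char) (List (List Char))) : Prop :=
  ∀ q l, d.get? q = some l → l = ws.filter (fun w => PySem.Chars.startswith w q)

theorem pvMsl_get?_ne (L : List (List Char)) : ∀ (d : PySem.Dict (List Char) (List (List Char)))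
    (s q : List Char), q ≠ s → (pvMsl L d s).get? q = d.get? q := by
  induction L with
  | nil => intro d s q _; rfl
  | cons w L ih =>
      intro d s q hq
      unfold pvMsl
      simp only [List.foldl_cons]
      by_cases hw : PySem.Chars.startswith w s
      · rw [hw, if_pos rfl]
        rw [show (List.foldl _ _ L : PySem.Dict (List Char) (List (List Char))) = pvMsl L (d.insert s (d.getD s [] ++ [w])) s from rfl,
          ih _ s q hq, PySem.Dict.get?_insert_of_ne _ _ hq]
      · simp only [hw, Bool.false_eq_true, if_false]
        exact ih d s q hq

theorem pvMsl_get?_self (L : List (List Char)) : ∀ (d : PySem.Dict (List Char) (List (List Char)))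
    (s : List Char),
    (pvMsl L d s).get? s =
      if L.filter (fun w => PySem.Chars.startswith w s) = [] then d.get? s
      else some (d.getD s [] ++ L.filter (fun w => PySem.Chars.startswith w s)) := by
  induction L with
  | nil => intro d s; simp [pvMsl]
  | cons w L ih =>
      intro d s
      unfold pvMsl
      simp only [List.foldl_cons, List.filter_cons]
      by_cases hw : PySem.Chars.startswith w s
      · rw [hw, if_pos rfl, if_pos rfl]
        rw [show (List.foldl _ _ L : PySem.Dict (List Char) (List (List Char))) = pvMsl L (d.insert s (d.getD s [] ++ [w])) s from rfl, ih]
        by_cases hf : L.filter (fun w => PySem.Chars.startswith w s) = []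
        · simp [hf, PySem.Dict.get?_insert_self]
        · simp [hf, PySem.Dict.getD_insert_self]
      · simp only [hw, Bool.false_eq_true, if_false]
        exact ih d s

theorem pvFilter_filter_prefix (ws : List (List Char)) (p p' : List Char) (h : p <+: p') :
    (ws.filter (fun w => PySem.Chars.startswith w p)).filter
        (fun w => PySem.Chars.startswith w p')
      = ws.filter (fun w => PySem.Chars.startswith w p') := by
  rw [List.filter_filter]
  apply List.filter_congr
  intro w _
  by_cases hw : PySem.Chars.startswith w p' = true
  · have : p' <+: w := (PySem.Chars.startswith_iff w p').mp hw
    have : p <+: w := h.trans this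
    have hp : PySem.Chars.startswith w p = true := (PySem.Chars.startswith_iff w p).mpr this
    simp [hw, hp]
  · simp only [Bool.not_eq_true] at hw
    simp [hw]

theorem pvContains_get? {d : PySem.Dict (List Char) (List (List Char))} {k : List Char}
    (h : d.contains k = true) : ∃ l, d.get? k = some l := by
  cases hg : d.get? k with
  | none => rw [(PySem.Dict.get?_eq_none_iff_contains d k).mp hg] at h; cases h
  | some l => exact ⟨l, rfl⟩

theorem pvLoopA_spec (ws : List (List Char)) (chars : List Char) : ∀ (p : List Char)
    (ans : Int) (d : PySem.Dict (List Char) (List (List Char))),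
    (p ++ chars) ∈ ws → pvInv ws d → d.contains p = true →
    (pvLoopA chars p p ans d).1 = ans + (pvSteps ws p chars : Int)
      ∧ pvInv ws (pvLoopA chars p p ans d).2
      ∧ ∀ q, d.contains q = true → (pvLoopA chars p p ans d).2.contains q = true := by
  induction chars with
  | nil =>
      intro p ans d _ hinv _
      exact ⟨by simp [pvLoopA, pvSteps], hinv, fun q hq => hq⟩
  | cons c rest ih =>
      intro p ans d hmem hinv hp
      -- the word and the new prefix
      have hword : (p ++ [c]) ++ rest = p ++ c :: rest := (List.append_cons p c rest).symm
      have hpref : (p ++ [c]) <+: p ++ c :: rest := by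
        rw [← hword]; exact List.prefix_append _ _
      obtain ⟨lp, hlp⟩ := pvContains_get? hp
      have hlpv : lp = ws.filter (fun w => PySem.Chars.startswith w p) := hinv _ _ hlp
      set p' := p ++ [c] with hp'
      set d' := if d.contains p' then d else pvMsl (d.getD p []) d p' with hd'
      have hsw : PySem.Chars.startswith (p ++ c :: rest) p' = true :=
        (PySem.Chars.startswith_iff _ _).mpr hpref
      have hstep : pvInv ws d' ∧ d'.contains p' = true
          ∧ (∀ q, d.contains q = true → d'.contains q = true) := by
        by_cases hc : d.contains p' = true
        · have hdd : d' = d := by rw [hd', if_pos hc]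
          exact ⟨by rw [hdd]; exact hinv, by rw [hdd]; exact hc,
                 fun q hq => by rw [hdd]; exact hq⟩
        · have hc' : d.contains p' = false := by simpa using hc
          have hnone : d.get? p' = none := (PySem.Dict.get?_eq_none_iff_contains d p').mpr hc'
          have hgd : d.getD p [] = ws.filter (fun w => PySem.Chars.startswith w p) := by
            rw [PySem.Dict.getD_of_get?_eq_some d [] hlp, hlpv]
          have hfil : (d.getD p []).filter (fun w => PySem.Chars.startswith w p')
              = ws.filter (fun w => PySem.Chars.startswith w p') := by
            rw [hgd]
            exact pvFilter_filter_prefix ws p p' (List.prefix_append _ _)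
          have hne : (d.getD p []).filter (fun w => PySem.Chars.startswith w p') ≠ [] := by
            rw [hfil]
            intro hnil
            have : (p ++ c :: rest) ∈ ws.filter (fun w => PySem.Chars.startswith w p') :=
              List.mem_filter.mpr ⟨hmem, hsw⟩
            rw [hnil] at this
            cases this
          have hget : (pvMsl (d.getD p []) d p').get? p'
              = some (ws.filter (fun w => PySem.Chars.startswith w p')) := by
            rw [pvMsl_get?_self, if_neg hne, PySem.Dict.getD_of_get?_eq_none _ _ hnone,
              List.nil_append, hfil]
          have hdd : d' = pvMsl (d.getD p []) d p' := by rw [hd', if_neg hc]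
          rw [hdd]
          refine ⟨?_, ?_, ?_⟩
          · intro q l hq
            by_cases hqp : q = p'
            · subst hqp; rw [hget] at hq; exact (Option.some.inj hq).symm
            · rw [pvMsl_get?_ne _ _ _ _ hqp] at hq; exact hinv _ _ hq
          · cases hcc : (pvMsl (d.getD p []) d p').contains p'
            · rw [← (PySem.Dict.get?_eq_none_iff_contains _ p'), hget] at hcc; cases hcc
            · rfl
          · intro q hq
            by_cases hqp : q = p'
            · subst hqp; rw [hq] at hc'; cases hc'
            · cases hcc : (pvMsl (d.getD p []) d p').contains q
              · rw [← (PySem.Dict.get?_eq_none_iff_contains _ q), pvMsl_get?_ne _ _ _ _ hqp] at hcc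
                obtain ⟨l, hl⟩ := pvContains_get? hq
                rw [hl] at hcc; cases hcc
              · rfl
      obtain ⟨hinv', hcp', hmono⟩ := hstep
      obtain ⟨lq, hlq⟩ := pvContains_get? hcp'
      have hlqv : lq = ws.filter (fun w => PySem.Chars.startswith w p') := hinv' _ _ hlq
      have hgd' : d'.getD p' [] = ws.filter (fun w => PySem.Chars.startswith w p') := by
        rw [PySem.Dict.getD_of_get?_eq_some d' [] hlq, hlqv]
      have hcount : (d'.getD p' []).length = pvCntS ws p' := by
        rw [hgd']; rfl
      have hunfold : pvLoopA (c :: rest) p p ans d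
          = (if (d'.getD p' []).length == 1 then (ans + 1, d')
             else pvLoopA rest p' p' (ans + 1) d') := rfl
      by_cases h1 : pvCntS ws p' = 1
      · have hb : ((d'.getD p' []).length == 1) = true := by rw [hcount, h1]; simp
        rw [hunfold, hb, if_pos rfl]
        refine ⟨?_, hinv', fun q hq => hmono q hq⟩
        simp [pvSteps, ← hp', h1]
      · have hb : ((d'.getD p' []).length == 1) = false := by
          rw [hcount]; simpa using h1
        rw [hunfold, hb]
        simp only [Bool.false_eq_true, if_false]
        have hmem' : p' ++ rest ∈ ws := by rw [hp', hword]; exact hmem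
        obtain ⟨h1', h2', h3'⟩ := ih p' (ans + 1) d' hmem' hinv' hcp'
        refine ⟨?_, h2', fun q hq => h3' q (hmono q hq)⟩
        rw [h1']
        simp [pvSteps, ← hp', h1]
        ring

theorem pvFoldA_spec (ws : List (List Char)) (l : List (List Char)) : ∀ (ans : Int)
    (d : PySem.Dict (List Char) (List (List Char))),
    (∀ w ∈ l, w ∈ ws) → pvInv ws d → d.contains [] = true →
    (l.foldl (fun (st : Int × PySem.Dict (List Char) (List (List Char))) w =>
        pvLoopA w [] [] st.1 st.2) (ans, d)).1
      = ans + (l.map (fun w => (pvSteps ws [] w : Int))).sum := by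
  induction l with
  | nil => intro ans d _ _ _; simp
  | cons w l ih =>
      intro ans d hsub hinv hnil
      have hw : ([] : List Char) ++ w ∈ ws := by simpa using hsub w (by simp)
      obtain ⟨h1, h2, h3⟩ := pvLoopA_spec ws w [] ans d hw hinv hnil
      simp only [List.foldl_cons]
      have hpair : pvLoopA w [] [] ans d
          = ((pvLoopA w [] [] ans d).1, (pvLoopA w [] [] ans d).2) := rfl
      rw [hpair, ih _ _ (fun v hv => hsub v (by simp [hv])) h2 (h3 [] hnil), h1]
      simp
      ring


-- ===== VERDICT (by name: the statement is the Claim_ definition above) =====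
theorem solution_spec : Claim_equal_solution := by
  intro words _
  unfold Spec_solution solution solution_alt
  set ws := words.map String.toList with hws
  -- A's side
  have hinv0 : pvInv ws ((PySem.Dict.empty).insert [] ws) := by
    intro q l hq
    rw [PySem.Dict.get?_insert] at hq
    by_cases hqe : q = []
    · subst hqe
      rw [if_pos rfl] at hq
      have hl : l = ws := (Option.some.inj hq).symm
      subst hl
      rw [List.filter_eq_self.mpr]
      intro w _
      exact (PySem.Chars.startswith_iff w []).mpr (List.nil_prefix)
    · rw [if_neg hqe, PySem.Dict.get?_empty] at hq; cases hq
  have hA := pvFoldA_spec ws ws 0 ((PySem.Dict.empty).insert [] ws)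
    (fun w hw => hw) hinv0 (PySem.Dict.contains_insert_self _ _ _)
  rw [hA]
  -- B's side
  rw [pvFoldl_add_sum]
  simp only [zero_add]
  congr 1
  apply List.map_congr_left
  intro w _
  have harg : (w.length : Int) = 0 + (w.length : Int) := by ring
  rw [harg, pvTyped_eq ws w [] 0]
  ring
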